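-- pv_equiv track=rewrite | github.com/AmritaCSN/MAJOR_PROJECT_NETWORK_DEVIICE_IDENTITY_MANAGEMENT_USING_CRYPTOGRAPHY_Jishnu_Nair | src/New_Authentication.py | div_binary_into_n_parts_SYSTEM
-- ===== SOURCE A (Python) =====
-- BITS = 8
--
-- def div_binary_into_n_parts_SYSTEM(a, n):
--     k, m = divmod(len(a), n)
--     four_parts_temp = list((a[i * k + min(i, m):(i + 1) * k + min(i + 1, m)] for i in range(n)))
--     max_length = max(len(part) for part in four_parts_temp)
--     for i in range(len(four_parts_temp)):
--         if len(four_parts_temp[i]) < max_length: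
--             four_parts_temp[i].append("0" * BITS)
--     return four_parts_temp
-- ===== SOURCE B (Python) =====
-- BITS = 8
--
-- def div_binary_into_n_parts_SYSTEM(a, n):
--     # Greedy ceiling-division chunking: repeatedly take ceil(len(rest)/parts_left)
--     # elements off the front; a chunk shorter than the first one gets the zero pad.
--     res = []
--     rest = a
--     parts = n
--     first_size = None
--     while parts != 0:
--         size = -(-len(rest) // parts)
--         if first_size is None:
--             first_size = size
--         part = list(rest[:size])
--         if size < first_size:
--             part.append("0" * BITS)
--         res.append(part)
--         rest = rest[size:]
--         parts -= 1
--     return res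
-- ===== Notes on version B (the rewrite author's own statement) =====
-- stated objective: simpler
-- what changed: Replaces A's divmod plus index-formula slice comprehension, max-length scan and separate padding pass by a greedy loop that repeatedly takes ceil(len(rest)/parts_left) elements off the front of the remaining list and pads a chunk exactly when it is shorter than the first chunk, with no divmod and no index arithmetic or extra passes.
import Mathlib
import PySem

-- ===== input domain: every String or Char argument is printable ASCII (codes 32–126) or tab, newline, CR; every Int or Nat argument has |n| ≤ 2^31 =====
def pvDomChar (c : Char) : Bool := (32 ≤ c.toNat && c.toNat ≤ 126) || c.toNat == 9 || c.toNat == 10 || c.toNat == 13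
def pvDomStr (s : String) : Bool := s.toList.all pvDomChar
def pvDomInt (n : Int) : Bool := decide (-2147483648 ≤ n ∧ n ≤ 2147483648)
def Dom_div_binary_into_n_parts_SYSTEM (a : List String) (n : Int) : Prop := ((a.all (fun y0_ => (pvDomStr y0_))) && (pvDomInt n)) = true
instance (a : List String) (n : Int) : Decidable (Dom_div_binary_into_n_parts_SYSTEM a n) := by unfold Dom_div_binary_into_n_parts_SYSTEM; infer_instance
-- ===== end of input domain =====

-- B replaces A's index-formula slicing + max-length scan + padding pass by a greedy recursion
-- that repeatedly takes ceil(len(rest)/parts_left) elements off the front and pads any chunk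
-- shorter than the first one (objective: simpler — no divmod, no index arithmetic, no extra passes).

-- ===== PORT A =====
def div_binary_into_n_parts_SYSTEM (a : List String) (n : Int) : List (List String) :=
  let k := PySem.Int.floordiv (a.length : Int) n
  let m := PySem.Int.mod (a.length : Int) n
  let four_parts_temp := (PySem.List.pyRange 0 n 1).map (fun i =>
    PySem.List.slice a (some (i * k + min i m)) (some ((i + 1) * k + min (i + 1) m)))
  -- max(len(part) for part in four_parts_temp): raises on an empty sequence — the 'none' branch
  -- is unreachable inside Pre_ (1 ≤ n)
  match PySem.List.max? (four_parts_temp.map (fun p => (p.length : Int))) (fun x => x) with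
  | none => []
  | some maxLength =>
      four_parts_temp.map (fun p => if (p.length : Int) < maxLength then p ++ ["00000000"] else p)

-- ===== PORT B =====
-- the while loop of Source B over its state (res, rest, parts, first_size); the 'parts < 0' guard
-- only makes the recursion total (Python B never terminates there; such inputs are outside Pre_)
def pvGoB (res : List (List String)) (rest : List String) (parts : Int) (firstSize : Option Int) : List (List String) :=
  if parts = 0 then res
  else if parts < 0 then res
  else
    let size := -(PySem.Int.floordiv (-(rest.length : Int)) parts)
    let fs := firstSize.getD size
    let part := PySem.List.slice rest none (some size)
    let part := if size < fs then part ++ ["00000000"] else part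
    pvGoB (res ++ [part]) (PySem.List.slice rest (some size) none) (parts - 1) (some fs)
termination_by parts.toNat
decreasing_by omega

def div_binary_into_n_parts_SYSTEM_alt (a : List String) (n : Int) : List (List String) :=
  pvGoB [] a n none

-- ===== PRECONDITION & SPEC =====
-- Pre_ excludes n ≤ 0, where A raises (ZeroDivisionError at n = 0, ValueError from max() on an
-- empty sequence at n < 0); it admits every input A returns on.
def Pre_div_binary_into_n_parts_SYSTEM (a : List String) (n : Int) : Prop := 1 ≤ n
instance (a : List String) (n : Int) : Decidable (Pre_div_binary_into_n_parts_SYSTEM a n) := by unfold Pre_div_binary_into_n_parts_SYSTEM; infer_instance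
def pvWitness_div_binary_into_n_parts_SYSTEM : List String × Int := (["10101010", "11110000", "00001111"], 2)

def Spec_div_binary_into_n_parts_SYSTEM (a : List String) (n : Int) (out : List (List String)) : Prop := out = div_binary_into_n_parts_SYSTEM_alt a n
instance (a : List String) (n : Int) (out : List (List String)) : Decidable (Spec_div_binary_into_n_parts_SYSTEM a n out) := by unfold Spec_div_binary_into_n_parts_SYSTEM; infer_instance

-- ===== CLAIM (what is proved, stated in full; the proofs are below) =====
def Claim_equal_div_binary_into_n_parts_SYSTEM : Prop := ∀ (a : List String) (n : Int), Dom_div_binary_into_n_parts_SYSTEM a n → Pre_div_binary_into_n_parts_SYSTEM a n → Spec_div_binary_into_n_parts_SYSTEM a n (div_binary_into_n_parts_SYSTEM a n)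

-- ===== LEMMAS AND PROOFS =====

-- clampIdx is the identity on in-range nonnegative bounds
lemma pv_clampIdx_eq (L : Nat) (b : Int) (h0 : 0 ≤ b) (h1 : b ≤ (L : Int)) :
    PySem.List.clampIdx L b = b.toNat := by
  unfold PySem.List.clampIdx
  split_ifs <;> omega

-- one unfolding of pvGoB for positive parts
lemma pvGoB_pos (res : List (List String)) (rest : List String) (parts : Int) (fs? : Option Int) (h : 0 < parts) :
    pvGoB res rest parts fs? =
      (let size := -(PySem.Int.floordiv (-(rest.length : Int)) parts)
       let fs := fs?.getD size
       let part := PySem.List.slice rest none (some size)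
       let part := if size < fs then part ++ ["00000000"] else part
       pvGoB (res ++ [part]) (PySem.List.slice rest (some size) none) (parts - 1) (some fs)) := by
  rw [pvGoB]
  have h1 : ¬ parts = 0 := by omega
  have h2 : ¬ parts < 0 := by omega
  simp [h1, h2]

theorem div_binary_into_n_parts_SYSTEM_spec : Claim_equal_div_binary_into_n_parts_SYSTEM := by
  intro a n _hdom hpre
  unfold Spec_div_binary_into_n_parts_SYSTEM
  unfold Pre_div_binary_into_n_parts_SYSTEM at hpre
  have hn : 0 < n := by omega
  set L : Int := (a.length : Int) with hL
  have hL0 : 0 ≤ L := by positivity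
  set k : Int := PySem.Int.floordiv L n with hk
  set m : Int := PySem.Int.mod L n with hm
  have hm0 : 0 ≤ m := PySem.Int.mod_nonneg L hn
  have hmn : m < n := PySem.Int.mod_lt L hn
  have hkm : k * n + m = L := PySem.Int.floordiv_mul_add_mod L n
  have hk0 : 0 ≤ k := by
    rw [hk, PySem.Int.floordiv_eq_ediv_of_pos hn]
    exact Int.ediv_nonneg hL0 hn.le
  -- the running offset and per-chunk size
  set st : Int → Int := fun i => i * k + min i m with hst
  set sz : Int → Int := fun i => k + (if i < m then 1 else 0) with hsz
  have hsz0 : ∀ i : Int, 0 ≤ sz i := by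
    intro i; simp only [hsz]; split_ifs <;> omega
  have hstep : ∀ i : Int, st (i + 1) = st i + sz i := by
    intro i
    have hmin : min (i + 1) m = min i m + (if i < m then 1 else 0) := by
      split_ifs with h <;> omega
    simp only [hst, hsz, hmin]; ring
  have hstub : ∀ i : Int, 0 ≤ i → i ≤ n → 0 ≤ st i ∧ st i ≤ L := by
    intro i h0 h1
    constructor
    · have : 0 ≤ i * k := mul_nonneg h0 hk0
      simp only [hst]; omega
    · have : i * k ≤ n * k := mul_le_mul_of_nonneg_right h1 hk0
      have hnm : n * k = k * n := mul_comm n k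
      simp only [hst]; omega
  -- remaining length after chunk i
  have hrem : ∀ i : Int, L - st i = k * (n - i) + (m - min i m) := by
    intro i
    simp only [hst]
    rw [← hkm]; ring
  -- greedy ceiling division reproduces the chunk size
  have hceil : ∀ i : Int, 0 ≤ i → i < n →
      -(PySem.Int.floordiv (-(L - st i)) (n - i)) = sz i := by
    intro i h0 h1
    rw [PySem.Int.neg_floordiv_neg_eq_iff_of_pos (show (0:Int) < n - i by omega)]
    have hr := hrem i
    have e1 : (sz i - 1) * (n - i) = k * (n - i) + (if i < m then 1 else 0) * (n - i) - (n - i) := by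
      simp only [hsz]; ring
    have e2 : sz i * (n - i) = k * (n - i) + (if i < m then 1 else 0) * (n - i) := by
      simp only [hsz]; ring
    constructor
    · rw [e1]
      split_ifs with h
      · have : min i m = i := by omega
        rw [this] at hr; linarith
      · have : min i m = m := by omega
        rw [this] at hr; linarith
    · rw [e2]
      split_ifs with h
      · have : min i m = i := by omega
        rw [this] at hr; linarith
      · have : min i m = m := by omega
        rw [this] at hr; linarith
  -- A's slice of chunk i and its length
  set f : Int → List String := fun i => PySem.List.slice a (some (st i)) (some (st (i + 1))) with hf
  have hlen : ∀ i : Int, 0 ≤ i → i < n → ((f i).length : Int) = sz i := by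
    intro i h0 h1
    have hb0 := hstub i h0 (by omega)
    have hb1 := hstub (i + 1) (by omega) (by omega)
    have hmono : st i ≤ st (i + 1) := by
      rw [hstep i]; have := hsz0 i; omega
    simp only [hf, PySem.List.length_slice,
      pv_clampIdx_eq a.length (st i) hb0.1 hb0.2,
      pv_clampIdx_eq a.length (st (i + 1)) hb1.1 hb1.2]
    rw [hstep i]
    have := hsz0 i
    omega
  -- f i as drop/take
  have hfdt : ∀ i : Int, 0 ≤ i → i < n →
      f i = (a.drop (st i).toNat).take (sz i).toNat := by
    intro i h0 h1
    have hb0 := hstub i h0 (by omega)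
    have hb1 := hstub (i + 1) (by omega) (by omega)
    simp only [hf]
    rw [PySem.List.slice_toNat a hb0.1 hb1.1]
    congr 1
    have := hstep i
    have := hsz0 i
    omega
  -- the common padded part
  set tgt : Int := if 0 < m then k + 1 else k with htgt
  set G : Int → List String := fun i =>
    if 0 < m ∧ m ≤ i then f i ++ ["00000000"] else f i with hG
  have hsz_le_tgt : ∀ i : Int, 0 ≤ i → sz i ≤ tgt := by
    intro i h0
    show k + (if i < m then 1 else 0) ≤ if 0 < m then k + 1 else k
    split_ifs <;> omega
  have hsz0_tgt : sz 0 = tgt := by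
    show k + (if (0:Int) < m then 1 else 0) = if 0 < m then k + 1 else k
    split_ifs <;> omega
  have hst0 : st 0 = 0 := by
    show 0 * k + min 0 m = 0
    rw [zero_mul, zero_add]
    omega
  -- pad test: sz i < tgt ↔ 0 < m ∧ m ≤ i
  have hpad : ∀ i : Int, 0 ≤ i → i < n → (sz i < tgt ↔ (0 < m ∧ m ≤ i)) := by
    intro i h0 h1
    simp only [hsz, htgt]
    split_ifs <;> omega
  -- ===== B equals map G =====
  have hB : ∀ (c : Nat) (i : Int), 0 ≤ i → i ≤ n → (n - i).toNat = c →
      ∀ acc : List (List String),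
      pvGoB acc (a.drop (st i).toNat) (n - i) (some tgt) = acc ++ (PySem.List.pyRange i n 1).map G := by
    intro c
    induction c with
    | zero =>
        intro i h0 h1 hc acc
        have hni : n ≤ i := by omega
        have hi : n - i = 0 := by omega
        rw [PySem.List.pyRange_one_eq_nil hni, hi, pvGoB]
        simp
    | succ c ih =>
        intro i h0 h1 hc acc
        have hin : i < n := by omega
        rw [PySem.List.pyRange_one_cons hin, pvGoB_pos _ _ _ _ (by omega)]
        have hbnd := hstub i h0 (by omega)
        have hrlen : ((a.drop (st i).toNat).length : Int) = L - st i := by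
          rw [List.length_drop]; omega
        simp only [hrlen, hceil i h0 hin, Option.getD_some]
        have hslice1 : PySem.List.slice (a.drop (st i).toNat) none (some (sz i)) = f i := by
          rw [PySem.List.slice_to _ (hsz0 i), hfdt i h0 hin]
        have hslice2 : PySem.List.slice (a.drop (st i).toNat) (some (sz i)) none
            = a.drop (st (i + 1)).toNat := by
          rw [PySem.List.slice_from _ (hsz0 i), List.drop_drop]
          congr 1
          have := hstep i
          have := hsz0 i
          omega
        have harith : n - i - 1 = n - (i + 1) := by ring
        rw [hslice1, hslice2, harith, ih (i + 1) (by omega) (by omega) (by omega)]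
        simp only [List.map_cons, hG, List.append_assoc, List.singleton_append]
        congr 2
        by_cases hc' : 0 < m ∧ m ≤ i
        · rw [if_pos ((hpad i h0 hin).mpr hc'), if_pos hc']
        · rw [if_neg (fun h => hc' ((hpad i h0 hin).mp h)), if_neg hc']
  have hBfull : div_binary_into_n_parts_SYSTEM_alt a n = (PySem.List.pyRange 0 n 1).map G := by
    unfold div_binary_into_n_parts_SYSTEM_alt
    rw [pvGoB_pos _ _ _ _ hn]
    have hsz_first : -(PySem.Int.floordiv (-L) n) = sz 0 := by
      have h := hceil 0 le_rfl hn
      simp only [hst0, sub_zero] at h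
      exact h
    simp only [← hL, Option.getD_none]
    simp only [hsz_first]
    have hnopad : ¬ sz 0 < sz 0 := lt_irrefl _
    rw [if_neg hnopad]
    have hslice1 : PySem.List.slice a none (some (sz 0)) = f 0 := by
      have h := hfdt 0 le_rfl hn
      rw [hst0] at h
      rw [PySem.List.slice_to _ (hsz0 0), h]
      simp
    have hslice2 : PySem.List.slice a (some (sz 0)) none = a.drop (st 1).toNat := by
      rw [PySem.List.slice_from _ (hsz0 0)]
      congr 1
      have h01 := hstep 0
      simp only [zero_add] at h01
      have := hst0
      omega
    rw [hslice1, hslice2, hsz0_tgt,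
        hB (n - 1).toNat 1 (by omega) (by omega) (by omega),
        PySem.List.pyRange_one_cons hn]
    simp only [List.map_cons, List.nil_append, List.singleton_append]
    congr 1
    have h00 : ¬ (0 < m ∧ m ≤ (0 : Int)) := by omega
    simp only [hG, if_neg h00]
  -- ===== A equals map G =====
  have hparts : ((PySem.List.pyRange 0 n 1).map (fun i =>
      PySem.List.slice a (some (i * k + min i m)) (some ((i + 1) * k + min (i + 1) m))))
      = (PySem.List.pyRange 0 n 1).map f := by
    refine List.map_congr_left ?_
    intro i _
    simp [hf, hst]
  have hmem0 : (0 : Int) ∈ PySem.List.pyRange 0 n 1 := by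
    rw [PySem.List.mem_pyRange_one]; omega
  have hlen0 : ((f 0).length : Int) = tgt := by
    rw [hlen 0 le_rfl hn]
    exact hsz0_tgt
  have hmax : PySem.List.max? (((PySem.List.pyRange 0 n 1).map f).map
      (fun p => ((p.length : Int)))) (fun x => x) = some tgt := by
    rcases hmx : PySem.List.max? (((PySem.List.pyRange 0 n 1).map f).map
        (fun p => ((p.length : Int)))) (fun x => x) with _ | M
    · rw [PySem.List.max?_eq_none_iff] at hmx
      simp only [List.map_eq_nil_iff] at hmx
      rw [hmx] at hmem0
      simp at hmem0
    · have hMmem := PySem.List.max?_mem hmx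
      have hMmax := PySem.List.max?_isMax hmx
      have hMle : M ≤ tgt := by
        simp only [List.mem_map] at hMmem
        obtain ⟨p, ⟨i, hi, hpi⟩, hpM⟩ := hMmem
        rw [PySem.List.mem_pyRange_one] at hi
        subst hpi hpM
        rw [hlen i hi.1 hi.2]
        exact hsz_le_tgt i hi.1
      have htle : tgt ≤ M := by
        have : ((f 0).length : Int) ∈ ((PySem.List.pyRange 0 n 1).map f).map
            (fun p => ((p.length : Int))) := by
          simp only [List.mem_map]
          exact ⟨f 0, ⟨0, hmem0, rfl⟩, rfl⟩
        have := hMmax _ this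
        rw [hlen0] at this
        exact this
      rw [hmx]
      exact congrArg some (le_antisymm hMle htle)
  -- assemble
  unfold div_binary_into_n_parts_SYSTEM
  rw [hBfull]
  simp only [← hL, ← hk, ← hm, hparts, hmax]
  rw [List.map_map]
  refine List.map_congr_left ?_
  intro i hi
  rw [PySem.List.mem_pyRange_one] at hi
  simp only [Function.comp_apply, hG]
  have hl := hlen i hi.1 hi.2
  by_cases hc : 0 < m ∧ m ≤ i
  · have : ((f i).length : Int) < tgt := by
      rw [hl]; exact (hpad i hi.1 hi.2).mpr hc
    simp [hc, this]
  · have : ¬ ((f i).length : Int) < tgt := by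
      rw [hl]; exact fun h => hc ((hpad i hi.1 hi.2).mp h)
    simp [hc, this]
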